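-- pv_equiv track=rewrite | github.com/rf-iasys/OEIS | OEIS_A162648_0.py | generate_a162648_official
-- ===== SOURCE A (Python) =====
-- def thue_morse(n_max):
--     t = [0] * n_max
--     for n in range(1, n_max):
--         t[n] = 1 - t[n // 2] if n % 2 else t[n // 2]
--     return t
--
-- def generate_a162648_official(n_max):
--     t = thue_morse(n_max + 3)  # need window of 4 bits
--     positions = []
--     for i in range(n_max - 3):
--         window = t[i:i+4]
--         if window == [1,0,0,1] or window == [0,1,1,0]:
--             positions.append(i)
--     return positions
-- ===== SOURCE B (Python) =====
-- def generate_a162648_official(n_max):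
--     # Closed-form Thue-Morse bit: parity of the popcount of n; no DP array.
--     def b(n):
--         return bin(n).count('1') & 1
--     return [i for i in range(n_max - 3)
--             if b(i) != b(i + 1) and b(i + 1) == b(i + 2) and b(i + 2) != b(i + 3)]
-- ===== Notes on version B (the rewrite author's own statement) =====
-- stated objective: idiomatic
-- what changed: B drops the DP thue_morse array entirely and computes each Thue-Morse bit by its closed form (parity of the binary popcount), emitting matching window positions with a single list comprehension testing the neq/eq/neq window shape instead of comparing slices against two pattern lists.
import Mathlib
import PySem

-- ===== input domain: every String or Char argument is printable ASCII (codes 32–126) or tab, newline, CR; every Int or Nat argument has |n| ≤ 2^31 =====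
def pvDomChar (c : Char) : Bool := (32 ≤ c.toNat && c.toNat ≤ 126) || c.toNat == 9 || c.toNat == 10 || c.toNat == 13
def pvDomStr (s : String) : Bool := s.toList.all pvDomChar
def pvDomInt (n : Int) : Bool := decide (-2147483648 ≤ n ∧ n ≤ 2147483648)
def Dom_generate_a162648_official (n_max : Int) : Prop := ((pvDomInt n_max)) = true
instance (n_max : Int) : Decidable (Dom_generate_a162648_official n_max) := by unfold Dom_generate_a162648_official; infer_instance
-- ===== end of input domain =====

-- B replaces A's DP array by the closed-form Thue-Morse bit (popcount parity); same values, no speed claim.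

-- ===== PORT A =====
-- helper: the loop body of thue_morse ('t[n] = 1 - t[n // 2] if n % 2 else t[n // 2]'; both indices are always in range)
def tmStep (t : List Int) (n : Int) : List Int :=
  PySem.List.pySetD t n
    (if PySem.Int.mod n 2 ≠ 0 then 1 - PySem.List.pyGetD t (PySem.Int.floordiv n 2) 0
     else PySem.List.pyGetD t (PySem.Int.floordiv n 2) 0)

def thue_morse (n_max : Int) : List Int :=
  (PySem.List.pyRange 1 n_max 1).foldl tmStep (List.replicate n_max.toNat 0)

def generate_a162648_official (n_max : Int) : List Int :=
  let t := thue_morse (n_max + 3)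
  (PySem.List.pyRange 0 (n_max - 3) 1).foldl
    (fun positions i =>
      let window := PySem.List.slice t (some i) (some (i + 4))
      if window = [1, 0, 0, 1] ∨ window = [0, 1, 1, 0] then positions ++ [i] else positions)
    []

-- ===== PORT B =====
-- helper: bin(n).count('1') for n ≥ 0 (ported by hand; exact for the nonnegative ints B applies it to)
def popcountNat (n : Nat) : Nat :=
  if n = 0 then 0 else n % 2 + popcountNat (n / 2)
decreasing_by exact Nat.div_lt_self (Nat.pos_of_ne_zero (by assumption)) (by omega)

-- helper: b(n) = bin(n).count('1') & 1
def bbit (n : Int) : Nat := popcountNat n.toNat &&& 1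

def generate_a162648_official_alt (n_max : Int) : List Int :=
  (PySem.List.pyRange 0 (n_max - 3) 1).filter
    (fun i => (bbit i != bbit (i + 1)) && (bbit (i + 1) == bbit (i + 2)) && (bbit (i + 2) != bbit (i + 3)))

-- ===== PRECONDITION & SPEC =====
def Spec_generate_a162648_official (n_max : Int) (out : List Int) : Prop := out = generate_a162648_official_alt n_max
instance (n_max : Int) (out : List Int) : Decidable (Spec_generate_a162648_official n_max out) := by unfold Spec_generate_a162648_official; infer_instance

-- ===== CLAIM (what is proved, stated in full; the proofs are below) =====
def Claim_equal_generate_a162648_official : Prop := ∀ (n_max : Int), Dom_generate_a162648_official n_max → Spec_generate_a162648_official n_max (generate_a162648_official n_max)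

-- ===== LEMMAS AND PROOFS =====

-- the Thue-Morse recurrence as a function on Nat
def tm (n : Nat) : Int :=
  if n = 0 then 0 else if n % 2 = 1 then 1 - tm (n / 2) else tm (n / 2)
decreasing_by all_goals exact Nat.div_lt_self (Nat.pos_of_ne_zero (by assumption)) (by omega)

theorem tm_eq_popcount_parity (n : Nat) : tm n = ((popcountNat n % 2 : Nat) : Int) := by
  induction n using Nat.strong_induction_on with
  | _ n ih =>
    rw [tm, popcountNat]
    by_cases h0 : n = 0
    · simp [h0]
    · have hlt : n / 2 < n := Nat.div_lt_self (Nat.pos_of_ne_zero h0) (by omega)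
      have ihh := ih (n / 2) hlt
      simp only [h0, if_false]
      have hp : popcountNat (n / 2) % 2 = 0 ∨ popcountNat (n / 2) % 2 = 1 := by omega
      have hm : n % 2 = 0 ∨ n % 2 = 1 := by omega
      rcases hm with hm | hm <;> rcases hp with hp | hp <;>
        simp [hm, hp, ihh, Nat.add_mod]

theorem tm_invariant (L : Nat) (m : Int) (t : List Int)
    (hlen : t.length = L) (hm : 1 ≤ m)
    (hinv : ∀ k : Nat, k < L → (k : Int) < m → t[k]? = some (tm k)) :
    ((PySem.List.pyRange m (L : Int) 1).foldl tmStep t).length = L ∧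
      ∀ k : Nat, k < L → ((PySem.List.pyRange m (L : Int) 1).foldl tmStep t)[k]? = some (tm k) := by
  by_cases hend : (L : Int) ≤ m
  · rw [PySem.List.pyRange_one_eq_nil hend]
    refine ⟨hlen, fun k hk => hinv k hk (by omega)⟩
  · rw [not_le] at hend
    rw [PySem.List.pyRange_one_cons hend]
    simp only [List.foldl_cons]
    have h0m : (0 : Int) ≤ m := by omega
    have hmN : (m.toNat : Int) = m := Int.toNat_of_nonneg h0m
    have hmL : m.toNat < L := by omega
    -- the written entry
    have hhalf : m.toNat / 2 < L := by
      have := Nat.div_le_self m.toNat 2; omega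
    have hhalfm : ((m.toNat / 2 : Nat) : Int) < m := by omega
    have hget : PySem.List.pyGetD t (PySem.Int.floordiv m 2) 0 = tm (m.toNat / 2) := by
      have hfd : PySem.Int.floordiv m 2 = ((m.toNat / 2 : Nat) : Int) := by
        rw [← hmN]; exact_mod_cast PySem.Int.floordiv_natCast m.toNat 2
      have := hinv (m.toNat / 2) hhalf hhalfm
      rw [hfd, PySem.List.pyGetD_natCast]
      simp [List.getD, this]
    have hmod : PySem.Int.mod m 2 = ((m.toNat % 2 : Nat) : Int) := by
      rw [← hmN]; exact_mod_cast PySem.Int.mod_natCast m.toNat 2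
    have hcond : (PySem.Int.mod m 2 ≠ 0) ↔ m.toNat % 2 = 1 := by rw [hmod]; omega
    have hval : (if PySem.Int.mod m 2 ≠ 0 then 1 - PySem.List.pyGetD t (PySem.Int.floordiv m 2) 0
        else PySem.List.pyGetD t (PySem.Int.floordiv m 2) 0) = tm m.toNat := by
      rw [tm]
      have hm0 : ¬ m.toNat = 0 := by omega
      simp only [hm0, if_false]
      by_cases hp : m.toNat % 2 = 1
      · rw [if_pos (hcond.mpr hp), if_pos hp, hget]
      · rw [if_neg (fun hc => hp (hcond.mp hc)), if_neg hp, hget]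
    have hstep : tmStep t m = t.set m.toNat (tm m.toNat) := by
      rw [tmStep, hval]
      nth_rewrite 1 [← hmN]
      rw [PySem.List.pySetD_natCast]
    rw [hstep]
    have := tm_invariant L (m + 1) (t.set m.toNat (tm m.toNat))
      (by simpa using hlen)
      (by omega)
      (by
        intro k hk hkm
        by_cases hkeq : k = m.toNat
        · subst hkeq
          simp [hlen, hmL]
        · rw [List.getElem?_set_ne (by omega)]
          exact hinv k hk (by omega))
    exact this
termination_by ((L : Int) - m).toNat
decreasing_by omega

theorem thue_morse_spec (L : Nat) :
    (thue_morse (L : Int)).length = L ∧ ∀ k : Nat, k < L → (thue_morse (L : Int))[k]? = some (tm k) := by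
  rw [thue_morse]
  have hrep : (List.replicate (L : Int).toNat (0 : Int)).length = L := by simp
  refine tm_invariant L 1 _ hrep (le_refl 1) ?_
  intro k hk hk1
  have hk0 : k = 0 := by omega
  subst hk0
  have : tm 0 = 0 := by rw [tm]; simp
  simp [this, hk]

-- l.take 4 written out for a list with at least 4 elements
theorem take_four (l : List Int) (h : 4 ≤ l.length) :
    l.take 4 = [l.getD 0 0, l.getD 1 0, l.getD 2 0, l.getD 3 0] := by
  match l with
  | a :: b :: c :: d :: rest => simp [List.take, List.getD]
  | [] | [_] | [_, _] | [_, _, _] => simp at h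

theorem window_shape (p0 p1 p2 p3 : Nat) (h0 : p0 < 2) (h1 : p1 < 2) (h2 : p2 < 2) (h3 : p3 < 2) :
    (([(p0 : Int), p1, p2, p3] = [1, 0, 0, 1] ∨ ([(p0 : Int), p1, p2, p3] : List Int) = [0, 1, 1, 0]) ↔
      (p0 ≠ p1 ∧ p1 = p2 ∧ p2 ≠ p3)) := by
  interval_cases p0 <;> interval_cases p1 <;> interval_cases p2 <;> interval_cases p3 <;> simp

-- ===== VERDICT (by name: the statement is the Claim_ definition above) =====
theorem generate_a162648_official_spec : Claim_equal_generate_a162648_official := by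
  intro n_max _
  unfold Spec_generate_a162648_official generate_a162648_official generate_a162648_official_alt
  rw [PySem.List.foldl_append_ite_eq_filter, List.nil_append]
  apply List.filter_congr
  intro i hi
  rw [PySem.List.mem_pyRange_one] at hi
  obtain ⟨hi0, hiu⟩ := hi
  set L : Nat := (n_max + 3).toNat with hLdef
  have hLcast : ((L : Nat) : Int) = n_max + 3 := by omega
  obtain ⟨hlen, hentries⟩ := thue_morse_spec L
  rw [hLcast] at hlen hentries
  set t := thue_morse (n_max + 3) with ht
  have hj : (i.toNat : Int) = i := Int.toNat_of_nonneg hi0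
  have hjL : i.toNat + 4 ≤ L := by omega
  have hd : ∀ k : Nat, k < 4 → (t.drop i.toNat).getD k 0 = ((popcountNat (i.toNat + k) % 2 : Nat) : Int) := by
    intro k hk
    rw [List.getD, List.getElem?_drop, hentries (i.toNat + k) (by omega)]
    simp [tm_eq_popcount_parity]
  have hslice : PySem.List.slice t (some i) (some (i + 4)) =
      [((popcountNat (i.toNat + 0) % 2 : Nat) : Int), ((popcountNat (i.toNat + 1) % 2 : Nat) : Int),
       ((popcountNat (i.toNat + 2) % 2 : Nat) : Int), ((popcountNat (i.toNat + 3) % 2 : Nat) : Int)] := by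
    rw [show (some (i + 4) : Option Int) = some ((i.toNat : Int) + ((4 : Nat) : Int)) by
          rw [hj]; norm_num,
        show (some i : Option Int) = some ((i.toNat : Int)) by rw [hj],
        PySem.List.slice_natCast_add,
        take_four _ (by simp [hlen]; omega)]
    rw [hd 0 (by omega), hd 1 (by omega), hd 2 (by omega), hd 3 (by omega)]
  have hb : ∀ k : Nat, bbit (i + (k : Int)) = popcountNat (i.toNat + k) % 2 := by
    intro k
    have hik : (i + (k : Int)).toNat = i.toNat + k := by omega
    rw [bbit, hik, Nat.and_one_is_mod]
  have hb0 : bbit i = popcountNat (i.toNat + 0) % 2 := by simpa using hb 0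
  have hb1 : bbit (i + 1) = popcountNat (i.toNat + 1) % 2 := by
    have := hb 1; norm_num at this; exact this
  have hb2 : bbit (i + 2) = popcountNat (i.toNat + 2) % 2 := by
    have := hb 2; norm_num at this; exact this
  have hb3 : bbit (i + 3) = popcountNat (i.toNat + 3) % 2 := by
    have := hb 3; norm_num at this; exact this
  simp only [hslice, hb0, hb1, hb2, hb3]
  rw [Bool.eq_iff_iff]
  simp only [decide_eq_true_eq, Bool.and_eq_true, bne_iff_ne, beq_iff_eq]
  have hw := window_shape (popcountNat (i.toNat + 0) % 2) (popcountNat (i.toNat + 1) % 2)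
      (popcountNat (i.toNat + 2) % 2) (popcountNat (i.toNat + 3) % 2)
      (by omega) (by omega) (by omega) (by omega)
  tauto
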